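-- pv_equiv track=rewrite | github.com/MichielSaey/Coding-Handbooks | Practice/Coding Chanlanges/Advent Of Code/2023/day_3/day_3.py | sum_of_surrounding_numbers
-- ===== SOURCE A (Python) =====
-- from enum import Enum
--
-- class Direction(Enum):
--     FORWARD = 1
--     BACKWARD = 2
--     BIDIRECTIONAL = 3
--
-- def digit_crawler(line: str, start_point: int, direction: Direction = Direction.FORWARD):
--     digit = ""
--     index_in_line = start_point
--     while len(line) > index_in_line >= 0:
--         if line[index_in_line].isdigit():
--             digit += line[index_in_line]
--             index_in_line = index_in_line + 1 if direction == Direction.FORWARD else index_in_line - 1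
--         else:
--             break
--
--     if direction == Direction.BACKWARD and digit != "":
--         digit = digit[::-1]
--     elif direction == Direction.BIDIRECTIONAL and digit != "":
--         # and if digit is not zero reverse it, and redo with a forward function loop
--         digit = digit[::-1]
--         forward_result = digit_crawler(line, start_point + 1, direction.FORWARD)
--         digit += str(forward_result) if forward_result else ""
--     return digit if digit.isdigit() else None
--
-- def sum_of_surrounding_numbers(schematic, symbol, required_amount_of_numbers = 0):
--     surrounding_numbers = []
--
--     # Left
--     middle_left_result = digit_crawler(schematic[symbol[0]], symbol[1] - 1, Direction.BACKWARD)
--     if middle_left_result: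
--         surrounding_numbers.append(int(middle_left_result))
--     # Middle top
--     top_middle_result = digit_crawler(schematic[symbol[0] - 1], symbol[1], Direction.BIDIRECTIONAL)
--     if top_middle_result:
--         surrounding_numbers.append(int(top_middle_result))
--     else:
--         top_left_result = digit_crawler(schematic[symbol[0] - 1], symbol[1] - 1, Direction.BACKWARD)
--         if top_left_result:
--             surrounding_numbers.append(int(top_left_result))
--         top_right_result = digit_crawler(schematic[symbol[0] - 1], symbol[1] + 1, Direction.FORWARD)
--         if top_right_result:
--             surrounding_numbers.append(int(top_right_result))
--
--     # Right
--     middle_right_result = digit_crawler(schematic[symbol[0]], symbol[1] + 1, Direction.FORWARD)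
--     if middle_right_result:
--         surrounding_numbers.append(int(middle_right_result))
--
--     # Middle bottom
--     bottom_middle_result = digit_crawler(schematic[symbol[0] + 1], symbol[1], Direction.BIDIRECTIONAL)
--     if bottom_middle_result:
--         surrounding_numbers.append(int(bottom_middle_result))
--     else:
--         bottom_left_result = digit_crawler(schematic[symbol[0] + 1], symbol[1] - 1, Direction.BACKWARD)
--         if bottom_left_result:
--             surrounding_numbers.append(int(bottom_left_result))
--         bottom_right_result = digit_crawler(schematic[symbol[0] + 1], symbol[1] + 1, Direction.FORWARD)
--         if bottom_right_result:
--             surrounding_numbers.append(int(bottom_right_result))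
--
--     if len(surrounding_numbers) == required_amount_of_numbers:
--         product_of_surrounding_numbers = 1
--         for result in surrounding_numbers:
--             product_of_surrounding_numbers *= result
--         return product_of_surrounding_numbers
--     return 0
-- ===== SOURCE B (Python) =====
-- def _digit_runs(line):
--     """Maximal runs of digits in line, as half-open (start, end) pairs."""
--     runs = []
--     start = None
--     for j, ch in enumerate(line):
--         if ch.isdigit():
--             if start is None:
--                 start = j
--         elif start is not None:
--             runs.append((start, j))
--             start = None
--     if start is not None:
--         runs.append((start, len(line)))
--     return runs
--
--
-- def _run_at(runs, j):
--     """The run containing column j, or None."""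
--     for s, e in runs:
--         if s <= j < e:
--             return (s, e)
--     return None
--
--
-- def sum_of_surrounding_numbers(schematic, symbol, required_amount_of_numbers=0):
--     r, c = symbol
--     mid_row = schematic[r]
--     top_row = schematic[r - 1]
--     bottom_row = schematic[r + 1]
--
--     def adjacent_in(line):
--         """Numbers adjacent to column c in a row above/below the symbol."""
--         runs = _digit_runs(line)
--         hit = _run_at(runs, c)
--         if hit is not None:
--             return [int(line[hit[0]:hit[1]])]
--         found = []
--         left = _run_at(runs, c - 1)
--         if left is not None:
--             found.append(int(line[left[0]:left[1]]))
--         right = _run_at(runs, c + 1)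
--         if right is not None:
--             found.append(int(line[right[0]:right[1]]))
--         return found
--
--     numbers = []
--     mid_runs = _digit_runs(mid_row)
--     left = _run_at(mid_runs, c - 1)
--     if left is not None:
--         numbers.append(int(mid_row[left[0]:c]))
--     numbers += adjacent_in(top_row)
--     right = _run_at(mid_runs, c + 1)
--     if right is not None:
--         numbers.append(int(mid_row[c + 1:right[1]]))
--     numbers += adjacent_in(bottom_row)
--
--     if len(numbers) != required_amount_of_numbers:
--         return 0
--     product = 1
--     for n in numbers:
--         product *= n
--     return product
-- ===== Notes on version B (the rewrite author's own statement) =====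
-- stated objective: alternative
-- what changed: Replaces the recursive directional digit_crawler (forward/backward/bidirectional char-by-char walks from each neighbour cell) by a single left-to-right pass per row that collects all maximal digit runs as (start,end) spans once, then reads the adjacent numbers off those spans (truncating the symbol's own row at the symbol column).
import Mathlib
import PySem

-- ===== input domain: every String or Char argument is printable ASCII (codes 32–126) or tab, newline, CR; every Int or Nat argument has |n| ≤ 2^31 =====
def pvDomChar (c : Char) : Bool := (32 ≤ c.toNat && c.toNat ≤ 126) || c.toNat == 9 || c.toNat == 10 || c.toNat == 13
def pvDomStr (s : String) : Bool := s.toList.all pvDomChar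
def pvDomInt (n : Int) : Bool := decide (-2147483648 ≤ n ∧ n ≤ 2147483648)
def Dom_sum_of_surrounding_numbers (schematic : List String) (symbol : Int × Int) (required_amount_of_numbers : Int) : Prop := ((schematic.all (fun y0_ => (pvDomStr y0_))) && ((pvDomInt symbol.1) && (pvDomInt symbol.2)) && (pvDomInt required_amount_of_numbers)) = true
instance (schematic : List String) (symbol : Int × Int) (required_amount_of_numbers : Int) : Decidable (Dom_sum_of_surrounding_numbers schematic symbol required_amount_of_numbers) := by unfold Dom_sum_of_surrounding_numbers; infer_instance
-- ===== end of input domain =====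

-- B replaces A's recursive directional digit_crawler by one maximal-digit-run scan per row (objective: alternative).

-- ===== PORT A =====

inductive PyDirection
  | forward
  | backward
  | bidirectional
deriving DecidableEq

def dirRank : PyDirection → Nat
  | .bidirectional => 1
  | _ => 0

-- int(s) on the digit strings both programs build (never raises there)
def pyInt (s : List Char) : Int := (PySem.Int.ofChars? s).getD 0

-- the while-loop of digit_crawler: collect digits from index i stepping +1 (forward) / -1
def crawlLoop (line : List Char) (fwd : Bool) : Nat → Int → List Char
  | 0, _ => []
  | fuel+1, i =>
    if 0 ≤ i ∧ i < (line.length : Int) then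
      let ch := (PySem.List.pyGet? line i).getD ' '
      if PySem.Chars.isdigit ch then
        ch :: crawlLoop line fwd fuel (if fwd then i + 1 else i - 1)
      else []
    else []

def digitCrawler (line : List Char) (startPoint : Int) (direction : PyDirection) : Option (List Char) :=
  match direction with
  | .forward =>
      let digit := crawlLoop line true (line.length + 1) startPoint
      if PySem.Chars.strIsdigit digit then some digit else none
  | .backward =>
      let digit := crawlLoop line false (line.length + 1) startPoint
      let digit := if digit ≠ [] then digit.reverse else digit
      if PySem.Chars.strIsdigit digit then some digit else none
  | .bidirectional =>
      let digit := crawlLoop line false (line.length + 1) startPoint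
      let digit :=
        if digit ≠ [] then
          let d := digit.reverse
          match digitCrawler line (startPoint + 1) .forward with
          | some f => d ++ (if f ≠ [] then f else [])   -- `digit += str(forward_result) if forward_result else ""`
          | none => d
        else digit
      if PySem.Chars.strIsdigit digit then some digit else none
termination_by dirRank direction
decreasing_by simp [dirRank]

-- Python truthiness of a crawler result (None / "" falsy)
def pyTruthy : Option (List Char) → Bool
  | some s => s ≠ []
  | none => false

-- `if result: surrounding_numbers.append(int(result))`
def pyTruthyAppend (nums : List Int) (res : Option (List Char)) : List Int :=
  if pyTruthy res then nums ++ [pyInt (res.getD [])] else nums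

def sum_of_surrounding_numbers (schematic : List String) (symbol : Int × Int) (required_amount_of_numbers : Int) : Int :=
  -- schematic[symbol[0]] etc.; Pre_ guarantees the row indices are in range, so getD is never used
  let midLine := ((PySem.List.pyGet? schematic symbol.1).getD "").toList
  let topLine := ((PySem.List.pyGet? schematic (symbol.1 - 1)).getD "").toList
  let botLine := ((PySem.List.pyGet? schematic (symbol.1 + 1)).getD "").toList
  let nums : List Int := []
  -- Left
  let nums := pyTruthyAppend nums (digitCrawler midLine (symbol.2 - 1) .backward)
  -- Middle top
  let topMid := digitCrawler topLine symbol.2 .bidirectional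
  let nums :=
    if pyTruthy topMid then nums ++ [pyInt (topMid.getD [])]
    else
      let nums := pyTruthyAppend nums (digitCrawler topLine (symbol.2 - 1) .backward)
      pyTruthyAppend nums (digitCrawler topLine (symbol.2 + 1) .forward)
  -- Right
  let nums := pyTruthyAppend nums (digitCrawler midLine (symbol.2 + 1) .forward)
  -- Middle bottom
  let botMid := digitCrawler botLine symbol.2 .bidirectional
  let nums :=
    if pyTruthy botMid then nums ++ [pyInt (botMid.getD [])]
    else
      let nums := pyTruthyAppend nums (digitCrawler botLine (symbol.2 - 1) .backward)
      pyTruthyAppend nums (digitCrawler botLine (symbol.2 + 1) .forward)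
  if (nums.length : Int) = required_amount_of_numbers then
    nums.foldl (fun p r => p * r) 1
  else 0

-- ===== PORT B =====

-- _digit_runs: one pass over enumerate(line), maximal digit runs as half-open (start, end) spans
def digitRuns (line : List Char) : List (Int × Int) :=
  let p := (PySem.List.enumerate line 0).foldl
    (fun (st : List (Int × Int) × Option Int) jc =>
      if PySem.Chars.isdigit jc.2 then
        match st.2 with
        | none => (st.1, some jc.1)
        | some _ => st
      else
        match st.2 with
        | some s => (st.1 ++ [(s, jc.1)], none)
        | none => st)
    ([], none)
  match p.2 with
  | some s => p.1 ++ [(s, (line.length : Int))]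
  | none => p.1

-- _run_at: first (and only) run containing column j
def runAt (runs : List (Int × Int)) (j : Int) : Option (Int × Int) :=
  runs.find? (fun se => decide (se.1 ≤ j) && decide (j < se.2))

-- numbers adjacent to column c in a row above/below the symbol
def adjacentIn (line : List Char) (c : Int) : List Int :=
  let runs := digitRuns line
  match runAt runs c with
  | some se => [pyInt (PySem.List.slice line (some se.1) (some se.2))]
  | none =>
      let found : List Int := []
      let found :=
        match runAt runs (c - 1) with
        | some se => found ++ [pyInt (PySem.List.slice line (some se.1) (some se.2))]
        | none => found
      match runAt runs (c + 1) with
      | some se => found ++ [pyInt (PySem.List.slice line (some se.1) (some se.2))]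
      | none => found

def sum_of_surrounding_numbers_alt (schematic : List String) (symbol : Int × Int) (required_amount_of_numbers : Int) : Int :=
  let c := symbol.2
  let midRow := ((PySem.List.pyGet? schematic symbol.1).getD "").toList
  let topRow := ((PySem.List.pyGet? schematic (symbol.1 - 1)).getD "").toList
  let botRow := ((PySem.List.pyGet? schematic (symbol.1 + 1)).getD "").toList
  let numbers : List Int := []
  let midRuns := digitRuns midRow
  let numbers :=
    match runAt midRuns (c - 1) with
    | some se => numbers ++ [pyInt (PySem.List.slice midRow (some se.1) (some c))]
    | none => numbers
  let numbers := numbers ++ adjacentIn topRow c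
  let numbers :=
    match runAt midRuns (c + 1) with
    | some se => numbers ++ [pyInt (PySem.List.slice midRow (some (c + 1)) (some se.2))]
    | none => numbers
  let numbers := numbers ++ adjacentIn botRow c
  if (numbers.length : Int) ≠ required_amount_of_numbers then 0
  else numbers.foldl (fun p n => p * n) 1

-- ===== PRECONDITION & SPEC =====

-- Pre_ excludes exactly the inputs where A raises IndexError: the three row indices
-- symbol[0]-1, symbol[0], symbol[0]+1 must all be valid Python indices into schematic.
def Pre_sum_of_surrounding_numbers (schematic : List String) (symbol : Int × Int) (required_amount_of_numbers : Int) : Prop :=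
  -(schematic.length : Int) ≤ symbol.1 - 1 ∧ symbol.1 + 1 < (schematic.length : Int)
instance (schematic : List String) (symbol : Int × Int) (required_amount_of_numbers : Int) : Decidable (Pre_sum_of_surrounding_numbers schematic symbol required_amount_of_numbers) := by unfold Pre_sum_of_surrounding_numbers; infer_instance

def pvWitness_sum_of_surrounding_numbers : List String × (Int × Int) × Int := (["123", "*..", "456"], (1, 0), 2)

def Spec_sum_of_surrounding_numbers (schematic : List String) (symbol : Int × Int) (required_amount_of_numbers : Int) (out : Int) : Prop := out = sum_of_surrounding_numbers_alt schematic symbol required_amount_of_numbers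
instance (schematic : List String) (symbol : Int × Int) (required_amount_of_numbers : Int) (out : Int) : Decidable (Spec_sum_of_surrounding_numbers schematic symbol required_amount_of_numbers out) := by unfold Spec_sum_of_surrounding_numbers; infer_instance

-- ===== CLAIM (what is proved, stated in full; the proofs are below) =====
def Claim_equal_sum_of_surrounding_numbers : Prop := ∀ (schematic : List String) (symbol : Int × Int) (required_amount_of_numbers : Int), Dom_sum_of_surrounding_numbers schematic symbol required_amount_of_numbers → Pre_sum_of_surrounding_numbers schematic symbol required_amount_of_numbers → Spec_sum_of_surrounding_numbers schematic symbol required_amount_of_numbers (sum_of_surrounding_numbers schematic symbol required_amount_of_numbers)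

-- ===== LEMMAS AND PROOFS =====

theorem pv_witness_ok : Dom_sum_of_surrounding_numbers pvWitness_sum_of_surrounding_numbers.1 pvWitness_sum_of_surrounding_numbers.2.1 pvWitness_sum_of_surrounding_numbers.2.2 ∧ Pre_sum_of_surrounding_numbers pvWitness_sum_of_surrounding_numbers.1 pvWitness_sum_of_surrounding_numbers.2.1 pvWitness_sum_of_surrounding_numbers.2.2 := by decide

-- ---- proof-side helpers ----

-- maximal digit run starting at position k / ending at position k
def fwdT (cs : List Char) (k : Nat) : List Char := (cs.drop k).takeWhile PySem.Chars.isdigit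
def bwdT (cs : List Char) (k : Nat) : List Char := ((cs.take (k+1)).reverse).takeWhile PySem.Chars.isdigit

-- recursive reading of B's run-collecting fold
def runsRec : List Char → Int → Option Int → List (Int × Int)
  | [], _, none => []
  | [], j, some s => [(s, j)]
  | ch :: t, j, st =>
      if PySem.Chars.isdigit ch then runsRec t (j+1) (some (st.getD j))
      else
        match st with
        | some s => (s, j) :: runsRec t (j+1) none
        | none => runsRec t (j+1) none

-- `(s, e)` is a maximal digit run of `cs`
def IsRun (cs : List Char) (s e : Int) : Prop :=
  0 ≤ s ∧ s < e ∧ e ≤ (cs.length : Int) ∧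
  (∀ k : Nat, s ≤ (k : Int) → (k : Int) < e → PySem.Chars.isdigit (cs.getD k ' ') = true) ∧
  (s = 0 ∨ PySem.Chars.isdigit (cs.getD (s-1).toNat ' ') = false) ∧
  (e = (cs.length : Int) ∨ PySem.Chars.isdigit (cs.getD e.toNat ' ') = false)

-- ---- generic takeWhile facts specialised to the default-' ' getD view ----

lemma tw_all {p : Char → Bool} : ∀ (l : List Char) (i : Nat), i < (l.takeWhile p).length →
    p (l.getD i ' ') = true := by
  intro l
  induction l with
  | nil => intro i h; simp at h
  | cons c t ih =>
    intro i h
    by_cases hc : p c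
    · cases i with
      | zero => simpa using hc
      | succ i =>
        simp [List.takeWhile_cons_of_pos hc] at h
        simpa using ih i (by omega)
    · simp [List.takeWhile_cons_of_neg hc] at h

lemma tw_stop {p : Char → Bool} : ∀ (l : List Char), (l.takeWhile p).length < l.length →
    p (l.getD (l.takeWhile p).length ' ') = false := by
  intro l
  induction l with
  | nil => intro h; simp at h
  | cons c t ih =>
    intro h
    by_cases hc : p c
    · simp only [List.takeWhile_cons_of_pos hc, List.length_cons] at h ⊢
      simpa using ih (by omega)
    · simpa [List.takeWhile_cons_of_neg hc] using (by simpa using hc)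

lemma tw_len_eq {p : Char → Bool} : ∀ (l : List Char) (n : Nat), n ≤ l.length →
    (∀ i : Nat, i < n → p (l.getD i ' ') = true) →
    (n = l.length ∨ p (l.getD n ' ') = false) →
    (l.takeWhile p).length = n := by
  intro l
  induction l with
  | nil =>
    intro n h _ _
    simp only [List.takeWhile_nil, List.length_nil]
    simp only [List.length_nil] at h
    omega
  | cons c t ih =>
    intro n hn hall hstop
    cases n with
    | zero =>
      have hc : p c = false := by
        rcases hstop with h | h
        · simp at h
        · simpa using h
      have hc' : ¬ p c := by simp [hc]
      simp [List.takeWhile_cons_of_neg hc']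
    | succ n =>
      have hc : p c = true := by simpa using hall 0 (by omega)
      rw [List.takeWhile_cons_of_pos hc]
      simp only [List.length_cons]
      have := ih n (by simpa using hn)
        (fun i hi => by simpa using hall (i+1) (by omega))
        (by rcases hstop with h | h
            · left; simpa using h
            · right; simpa using h)
      omega

lemma rev_take_succ (cs : List Char) (n : Nat) (h : n < cs.length) :
    (cs.take (n+1)).reverse = cs[n] :: (cs.take n).reverse := by
  rw [List.take_succ]
  simp [List.getElem?_eq_getElem h]

-- ---- crawl loop characterisation (port A) ----

lemma crawl_neg (cs : List Char) (fwd : Bool) (fuel : Nat) (i : Int) (h : i < 0) :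
    crawlLoop cs fwd fuel i = [] := by
  cases fuel with
  | zero => simp [crawlLoop]
  | succ fuel => simp only [crawlLoop]; rw [if_neg (by omega)]

lemma crawl_oob (cs : List Char) (fwd : Bool) (fuel : Nat) (i : Int)
    (h : ¬ (0 ≤ i ∧ i < (cs.length : Int))) :
    crawlLoop cs fwd fuel i = [] := by
  cases fuel with
  | zero => simp [crawlLoop]
  | succ fuel => simp only [crawlLoop]; rw [if_neg h]

lemma crawl_succ_in (cs : List Char) (fwd : Bool) (fuel : Nat) (j : Nat)
    (hj : j < cs.length) :
    crawlLoop cs fwd (fuel+1) (j : Int) =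
      if PySem.Chars.isdigit cs[j] then
        cs[j] :: crawlLoop cs fwd fuel (if fwd then (j : Int) + 1 else (j : Int) - 1)
      else [] := by
  simp only [crawlLoop]
  rw [if_pos ⟨Int.natCast_nonneg j, by exact_mod_cast hj⟩]
  have hget : PySem.List.pyGet? cs ((j : Nat) : Int) = some cs[j] := by
    simp [PySem.List.pyGet?, PySem.List.pyIdx?, hj]
  rw [hget]
  simp only [Option.getD_some]

lemma crawl_fwd (cs : List Char) : ∀ (fuel : Nat) (j : Nat), cs.length ≤ fuel + j →
    crawlLoop cs true fuel (j : Int) = fwdT cs j := by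
  intro fuel
  induction fuel with
  | zero =>
    intro j h
    have hnil : cs.drop j = [] := List.drop_eq_nil_of_le (by omega)
    simp [crawlLoop, fwdT, hnil]
  | succ fuel ih =>
    intro j h
    by_cases hj : j < cs.length
    · rw [crawl_succ_in cs true fuel j hj]
      have hdrop : cs.drop j = cs[j] :: cs.drop (j+1) := List.drop_eq_getElem_cons hj
      by_cases hd : PySem.Chars.isdigit cs[j]
      · rw [if_pos hd]
        have hcast : (j : Int) + 1 = ((j+1 : Nat) : Int) := by push_cast; ring
        simp only [if_true]
        rw [hcast, ih (j+1) (by omega)]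
        have hd' : PySem.Chars.isdigit cs[j] = true := hd
        simp only [fwdT]
        rw [hdrop, List.takeWhile_cons_of_pos hd']
      · rw [if_neg hd]
        have hd' : ¬ PySem.Chars.isdigit cs[j] := hd
        simp only [fwdT]
        rw [hdrop, List.takeWhile_cons_of_neg hd']
    · rw [crawl_oob cs true (fuel+1) j (by push_cast; omega)]
      have hnil : cs.drop j = [] := List.drop_eq_nil_of_le (by omega)
      simp [fwdT, hnil]

lemma crawl_bwd (cs : List Char) : ∀ (j : Nat) (fuel : Nat), j < cs.length → j + 1 ≤ fuel →
    crawlLoop cs false fuel (j : Int) = bwdT cs j := by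
  intro j
  induction j with
  | zero =>
    intro fuel hj hf
    obtain ⟨f, rfl⟩ : ∃ f, fuel = f + 1 := ⟨fuel - 1, by omega⟩
    rw [crawl_succ_in cs false f 0 hj]
    have hrt : (cs.take 1).reverse = cs[0] :: (cs.take 0).reverse := rev_take_succ cs 0 hj
    by_cases hd : PySem.Chars.isdigit cs[0]
    · rw [if_pos hd]
      simp only [Bool.false_eq_true, if_false]
      rw [crawl_neg cs false f (((0:Nat) : Int) - 1) (by omega)]
      have hd' : PySem.Chars.isdigit cs[0] = true := hd
      simp [bwdT, hrt, List.takeWhile_cons_of_pos hd']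
    · rw [if_neg hd]
      have hd' : ¬ PySem.Chars.isdigit cs[0] := hd
      simp [bwdT, hrt, List.takeWhile_cons_of_neg hd']
  | succ j ih =>
    intro fuel hj hf
    obtain ⟨f, rfl⟩ : ∃ f, fuel = f + 1 := ⟨fuel - 1, by omega⟩
    rw [crawl_succ_in cs false f (j+1) hj]
    have hrt : (cs.take (j+2)).reverse = cs[j+1] :: (cs.take (j+1)).reverse :=
      rev_take_succ cs (j+1) hj
    by_cases hd : PySem.Chars.isdigit cs[j+1]
    · rw [if_pos hd]
      simp only [Bool.false_eq_true, if_false]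
      have hcast : ((j+1 : Nat) : Int) - 1 = (j : Int) := by push_cast; ring
      rw [hcast, ih f (by omega) (by omega)]
      have hd' : PySem.Chars.isdigit cs[j+1] = true := hd
      simp [bwdT, hrt, List.takeWhile_cons_of_pos hd']
    · rw [if_neg hd]
      have hd' : ¬ PySem.Chars.isdigit cs[j+1] := hd
      simp [bwdT, hrt, List.takeWhile_cons_of_neg hd']

lemma runs_foldl (t : List Char) : ∀ (j : Int) (acc : List (Int × Int)) (st : Option Int),
    (match ((PySem.List.enumerate t j).foldl
      (fun (st : List (Int × Int) × Option Int) jc =>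
        if PySem.Chars.isdigit jc.2 then
          match st.2 with
          | none => (st.1, some jc.1)
          | some _ => st
        else
          match st.2 with
          | some s => (st.1 ++ [(s, jc.1)], none)
          | none => st)
      (acc, st)).2 with
     | some s => ((PySem.List.enumerate t j).foldl
      (fun (st : List (Int × Int) × Option Int) jc =>
        if PySem.Chars.isdigit jc.2 then
          match st.2 with
          | none => (st.1, some jc.1)
          | some _ => st
        else
          match st.2 with
          | some s => (st.1 ++ [(s, jc.1)], none)
          | none => st)
      (acc, st)).1 ++ [(s, j + (t.length : Int))]
     | none => ((PySem.List.enumerate t j).foldl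
      (fun (st : List (Int × Int) × Option Int) jc =>
        if PySem.Chars.isdigit jc.2 then
          match st.2 with
          | none => (st.1, some jc.1)
          | some _ => st
        else
          match st.2 with
          | some s => (st.1 ++ [(s, jc.1)], none)
          | none => st)
      (acc, st)).1)
    = acc ++ runsRec t j st := by
  induction t with
  | nil =>
    intro j acc st
    cases st <;> simp [PySem.List.enumerate_nil, runsRec]
  | cons c t ih =>
    intro j acc st
    rw [PySem.List.enumerate_cons, List.foldl_cons]
    have hlen : j + (((c :: t).length : Nat) : Int) = (j + 1) + ((t.length : Nat) : Int) := by
      push_cast; simp [List.length_cons]; ring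
    rw [hlen]
    by_cases hd : PySem.Chars.isdigit c
    · cases st with
      | none =>
        simp only [hd, if_true]
        rw [ih (j+1) acc (some j)]
        simp [runsRec, hd]
      | some s =>
        simp only [hd, if_true]
        rw [ih (j+1) acc (some s)]
        simp [runsRec, hd]
    · cases st with
      | none =>
        simp only [hd, Bool.false_eq_true, if_false]
        rw [ih (j+1) acc none]
        simp [runsRec, hd]
      | some s =>
        simp only [hd, Bool.false_eq_true, if_false]
        rw [ih (j+1) (acc ++ [(s, j)]) none]
        simp [runsRec, hd]

lemma digitRuns_eq (cs : List Char) : digitRuns cs = runsRec cs 0 none := by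
  have := runs_foldl cs 0 [] none
  simpa [digitRuns] using this

lemma runsRec_some (t : List Char) : ∀ (j : Int) (s : Int),
    runsRec t j (some s) =
      (s, j + ((t.takeWhile PySem.Chars.isdigit).length : Int)) ::
        runsRec (t.drop (t.takeWhile PySem.Chars.isdigit).length)
          (j + ((t.takeWhile PySem.Chars.isdigit).length : Int)) none := by
  induction t with
  | nil => intro j s; simp [runsRec]
  | cons c t ih =>
    intro j s
    by_cases hd : PySem.Chars.isdigit c
    · have hd' : PySem.Chars.isdigit c = true := hd
      simp only [runsRec, hd', if_true, Option.getD_some]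
      rw [ih (j+1) s]
      rw [List.takeWhile_cons_of_pos hd']
      simp only [List.length_cons, List.drop_succ_cons]
      have : j + ((t.takeWhile PySem.Chars.isdigit).length + 1 : Nat) =
          j + 1 + ((t.takeWhile PySem.Chars.isdigit).length : Nat) := by push_cast; ring
      rw [this]
    · have hd' : ¬ PySem.Chars.isdigit c := hd
      rw [List.takeWhile_cons_of_neg hd']
      simp [runsRec, hd]

-- ---- soundness/completeness of the runs ----

-- small index utilities
lemma getD_eq_getElem' (cs : List Char) (i : Nat) (h : i < cs.length) :
    cs.getD i ' ' = cs[i] := List.getD_eq_getElem cs ' ' h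

lemma getD_drop' (cs : List Char) (m i : Nat) : (cs.drop m).getD i ' ' = cs.getD (m+i) ' ' := by
  simp [List.getD, List.getElem?_drop]

lemma tw_eq_take {p : Char → Bool} (l : List Char) :
    l.takeWhile p = l.take (l.takeWhile p).length :=
  List.prefix_iff_eq_take.mp (List.takeWhile_prefix p)

lemma head_drop_cons (cs : List Char) (m : Nat) (c : Char) (t : List Char)
    (h : cs.drop m = c :: t) : m < cs.length ∧ cs.getD m ' ' = c := by
  have hlt : m < cs.length := by
    by_contra hge
    rw [List.drop_eq_nil_of_le (by omega)] at h
    exact absurd h (by simp)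
  refine ⟨hlt, ?_⟩
  have := getD_drop' cs m 0
  rw [h] at this
  simpa using this.symm

lemma first_run_isRun (cs : List Char) (j0 : Nat) (t : List Char)
    (ht : t = cs.drop j0) (c : Char) (t' : List Char) (hcons : t = c :: t')
    (hd : PySem.Chars.isdigit c = true)
    (hb : j0 = 0 ∨ PySem.Chars.isdigit (cs.getD (j0-1) ' ') = false) :
    IsRun cs (j0 : Int) ((j0 : Int) + ((t.takeWhile PySem.Chars.isdigit).length : Int)) := by
  obtain ⟨hj0lt, hhead⟩ := head_drop_cons cs j0 c t' (ht ▸ hcons)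
  have hw1 : 1 ≤ (t.takeWhile PySem.Chars.isdigit).length := by
    rw [hcons, List.takeWhile_cons_of_pos hd]
    simp
  have hwlen : (t.takeWhile PySem.Chars.isdigit).length ≤ t.length := by
    have h := List.takeWhile_prefix (l := t) PySem.Chars.isdigit
    exact h.length_le
  have htlen : t.length = cs.length - j0 := by rw [ht]; simp
  have hwcs : (t.takeWhile PySem.Chars.isdigit).length ≤ cs.length - j0 := le_trans hwlen (le_of_eq htlen)
  refine ⟨Int.natCast_nonneg j0, by omega, by push_cast; omega, ?_, ?_, ?_⟩
  · intro k hk1 hk2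
    have hk0 : j0 ≤ k := by exact_mod_cast hk1
    have hkw : k - j0 < (t.takeWhile PySem.Chars.isdigit).length := by omega
    have := tw_all t (k - j0) hkw
    rwa [ht, getD_drop', Nat.add_sub_cancel' hk0] at this
  · rcases hb with h | h
    · left; simp [h]
    · right
      have : (((j0:Int) - 1).toNat) = j0 - 1 := by omega
      rw [this]; exact h
  · by_cases hweq : (t.takeWhile PySem.Chars.isdigit).length = t.length
    · left; push_cast; omega
    · right
      have hstop := tw_stop (p := PySem.Chars.isdigit) t (by omega)
      rw [ht, getD_drop'] at hstop
      have h2 : (((j0:Int) + ((t.takeWhile PySem.Chars.isdigit).length : Int)).toNat)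
          = j0 + (t.takeWhile PySem.Chars.isdigit).length := by omega
      rw [h2, ht]
      exact hstop

lemma runs_sound_aux (cs : List Char) : ∀ (n : Nat) (t : List Char) (j0 : Nat),
    t.length ≤ n → t = cs.drop j0 →
    (∀ c t', t = c :: t' → PySem.Chars.isdigit c = true →
       (j0 = 0 ∨ PySem.Chars.isdigit (cs.getD (j0-1) ' ') = false)) →
    ∀ se ∈ runsRec t (j0 : Int) none, IsRun cs se.1 se.2 := by
  intro n
  induction n with
  | zero =>
    intro t j0 hn ht _ se hse
    have : t = [] := by
      cases t with
      | nil => rfl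
      | cons a b => simp at hn
    subst this
    simp [runsRec] at hse
  | succ n ih =>
    intro t j0 hn ht hb se hse
    cases t with
    | nil => simp [runsRec] at hse
    | cons c t' =>
      by_cases hd : PySem.Chars.isdigit c
      · have hd' : PySem.Chars.isdigit c = true := hd
        rw [runsRec] at hse
        rw [if_pos hd'] at hse
        simp only [Option.getD_none] at hse
        rw [runsRec_some] at hse
        set w' := (t'.takeWhile PySem.Chars.isdigit).length with hw'
        rcases List.mem_cons.mp hse with hfirst | hrest
        · subst hfirst
          have := first_run_isRun cs j0 (c :: t') ht c t' rfl hd' (hb c t' rfl hd')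
          rw [List.takeWhile_cons_of_pos hd'] at this
          simp only [List.length_cons] at this
          have hcast : ((j0 : Int) + 1) + (w' : Int) = (j0 : Int) + ((w' + 1 : Nat) : Int) := by
            push_cast; ring
          simpa [hcast] using this
        · have hcast : ((j0 : Int) + 1) + (w' : Int) = (((j0 + 1 + w' : Nat)) : Int) := by
            push_cast; ring
          rw [hcast] at hrest
          refine ih (t'.drop w') (j0 + 1 + w') ?_ ?_ ?_ se hrest
          · have : t'.length ≤ n := by simpa using hn
            have := List.length_drop (l := t') (i := w')
            omega
          · have ht' : t' = cs.drop (j0+1) := by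
              have := congrArg List.tail ht
              simpa [List.tail_drop] using this
            rw [ht', List.drop_drop]
            all_goals first | rfl | (congr 1; omega)
          · intro d t'' hdt hdig
            exfalso
            have hwlt : w' < t'.length := by
              by_contra hge
              rw [List.drop_eq_nil_of_le (by omega)] at hdt
              exact absurd hdt (by simp)
            have hstop := tw_stop (p := PySem.Chars.isdigit) t' hwlt
            obtain ⟨_, hget⟩ := head_drop_cons t' w' d t'' hdt
            rw [hget, hdig] at hstop
            exact absurd hstop (by simp)
      · rw [runsRec] at hse
        rw [if_neg (by simpa using hd)] at hse
        have hcast : (j0 : Int) + 1 = ((j0 + 1 : Nat) : Int) := by push_cast; ring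
        rw [hcast] at hse
        refine ih t' (j0 + 1) (by simpa using hn) ?_ ?_ se hse
        · have := congrArg List.tail ht
          simpa [List.tail_drop] using this
        · intro d t'' hdt _
          right
          obtain ⟨hlt, hget⟩ := head_drop_cons cs j0 c t' (by rw [← ht])
          simp only [Nat.add_sub_cancel]
          rw [hget]
          simpa using hd

lemma runs_sound (cs : List Char) : ∀ se ∈ digitRuns cs, IsRun cs se.1 se.2 := by
  rw [digitRuns_eq]
  exact runs_sound_aux cs cs.length cs 0 (le_refl _) (by simp)
    (fun _ _ _ _ => Or.inl rfl)

lemma runs_complete_aux (cs : List Char) : ∀ (n : Nat) (t : List Char) (j0 : Nat),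
    t.length ≤ n → t = cs.drop j0 →
    ∀ k : Nat, j0 ≤ k → k < cs.length → PySem.Chars.isdigit (cs.getD k ' ') = true →
    ∃ se ∈ runsRec t (j0 : Int) none, se.1 ≤ (k : Int) ∧ (k : Int) < se.2 := by
  intro n
  induction n with
  | zero =>
    intro t j0 hn ht k hk1 hk2 _
    have : t = [] := by
      cases t with
      | nil => rfl
      | cons a b => simp at hn
    subst this
    have hj : cs.length ≤ j0 := by
      have h' := ht.symm
      rw [List.drop_eq_nil_iff] at h'
      exact h'
    omega
  | succ n ih =>
    intro t j0 hn ht k hk1 hk2 hkd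
    cases t with
    | nil =>
      have hj : cs.length ≤ j0 := by
        have h' := ht.symm
        rw [List.drop_eq_nil_iff] at h'
        exact h'
      omega
    | cons c t' =>
      by_cases hd : PySem.Chars.isdigit c
      · have hd' : PySem.Chars.isdigit c = true := hd
        rw [runsRec, if_pos hd']
        simp only [Option.getD_none]
        rw [runsRec_some]
        set w' := (t'.takeWhile PySem.Chars.isdigit).length with hw'
        by_cases hkin : k < j0 + 1 + w'
        · refine ⟨((j0 : Int), ((j0 : Int) + 1) + (w' : Int)), List.mem_cons_self .., ?_, ?_⟩
          · show (j0 : Int) ≤ (k : Int)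
            exact_mod_cast hk1
          · show (k : Int) < ((j0 : Int) + 1) + (w' : Int)
            push_cast
            omega
        · have hcast : ((j0 : Int) + 1) + (w' : Int) = (((j0 + 1 + w' : Nat)) : Int) := by
            push_cast; ring
          rw [hcast]
          have hdr : t'.drop w' = cs.drop (j0 + 1 + w') := by
            have ht' : t' = cs.drop (j0+1) := by
              have := congrArg List.tail ht
              simpa [List.tail_drop] using this
            rw [ht', List.drop_drop]
            all_goals first | rfl | (congr 1; omega)
          have hlen2 : (t'.drop w').length ≤ n := by
            have : t'.length ≤ n := by simpa using hn
            have := List.length_drop (l := t') (i := w')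
            omega
          obtain ⟨se, hmem, hin⟩ := ih (t'.drop w') (j0 + 1 + w') hlen2 hdr k (by omega) hk2 hkd
          exact ⟨se, List.mem_cons_of_mem _ hmem, hin⟩
      · have hkne : j0 ≠ k := by
          intro heq
          obtain ⟨_, hget⟩ := head_drop_cons cs j0 c t' (ht ▸ rfl)
          rw [heq] at hget
          rw [hget] at hkd
          exact hd (by simp [hkd])
        rw [runsRec, if_neg (by simpa using hd)]
        have hcast : (j0 : Int) + 1 = ((j0 + 1 : Nat) : Int) := by push_cast; ring
        rw [hcast]
        refine ih t' (j0 + 1) (by simpa using hn) ?_ k (by omega) hk2 hkd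
        have := congrArg List.tail ht
        simpa [List.tail_drop] using this

lemma runs_complete (cs : List Char) (k : Nat) (hk : k < cs.length)
    (hd : PySem.Chars.isdigit (cs.getD k ' ') = true) :
    ∃ se ∈ digitRuns cs, se.1 ≤ (k : Int) ∧ (k : Int) < se.2 := by
  rw [digitRuns_eq]
  exact runs_complete_aux cs cs.length cs 0 (le_refl _) (by simp) k (by omega) hk hd

-- ---- uniqueness: a run containing j is pinned by the two takeWhile lengths ----

lemma run_uniq (cs : List Char) (s e : Int) (j : Nat) (hR : IsRun cs s e)
    (h1 : s ≤ (j : Int)) (h2 : (j : Int) < e) :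
    ((bwdT cs j).length : Int) = (j : Int) + 1 - s ∧
    ((fwdT cs j).length : Int) = e - (j : Int) := by
  obtain ⟨h0, hse, helen, hall, hleft, hright⟩ := hR
  constructor
  · -- backward length
    have hjlt : j < cs.length := by omega
    have hlen : ((cs.take (j+1)).reverse).length = j + 1 := by
      simp [List.length_take]
      omega
    have := tw_len_eq (p := PySem.Chars.isdigit) ((cs.take (j+1)).reverse) ((j+1 : Int) - s).toNat
      (by omega) ?_ ?_
    · unfold bwdT
      rw [this]
      omega
    · intro i hi
      have hidx : ((cs.take (j+1)).reverse).getD i ' ' = cs.getD (j - i) ' ' := by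
        have hi2 : i < j + 1 := by omega
        rw [getD_eq_getElem' _ i (by omega)]
        rw [List.getElem_reverse]
        rw [List.getElem_take]
        rw [getD_eq_getElem' _ _ (by omega)]
        congr 1
        simp [List.length_take]
        omega
      rw [hidx]
      exact hall (j - i) (by omega) (by omega)
    · by_cases hs0 : s = 0
      · left; omega
      · right
        have hn : ((j+1 : Int) - s).toNat < j + 1 := by omega
        have hidx : ((cs.take (j+1)).reverse).getD ((j+1 : Int) - s).toNat ' '
            = cs.getD (s-1).toNat ' ' := by
          rw [getD_eq_getElem' _ _ (by omega)]
          rw [List.getElem_reverse]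
          rw [List.getElem_take]
          rw [getD_eq_getElem' _ _ (by omega)]
          congr 1
          simp [List.length_take]
          omega
        rw [hidx]
        rcases hleft with h | h
        · omega
        · exact h
  · -- forward length
    have := tw_len_eq (p := PySem.Chars.isdigit) (cs.drop j) (e - (j : Int)).toNat
      (by simp [List.length_drop]; omega) ?_ ?_
    · unfold fwdT
      rw [this]
      omega
    · intro i hi
      rw [getD_drop']
      exact hall (j + i) (by omega) (by omega)
    · by_cases hee : e = (cs.length : Int)
      · left; simp [List.length_drop]; omega
      · right
        rw [getD_drop']
        have : j + (e - (j : Int)).toNat = e.toNat := by omega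
        rw [this]
        rcases hright with h | h
        · omega
        · exact h

-- ---- the characterisation of runAt ∘ digitRuns ----

lemma runAt_none (cs : List Char) (j : Int)
    (h : ¬ (0 ≤ j ∧ j < (cs.length : Int) ∧ PySem.Chars.isdigit (cs.getD j.toNat ' ') = true)) :
    runAt (digitRuns cs) j = none := by
  unfold runAt
  rw [List.find?_eq_none]
  intro se hse
  have hR := runs_sound cs se hse
  obtain ⟨h0, h1, h2, hall, _, _⟩ := hR
  simp only [Bool.and_eq_true, decide_eq_true_eq, not_and]
  intro hsle hlt
  exact h ⟨le_trans h0 hsle, lt_of_lt_of_le hlt h2,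
    by have := hall j.toNat (by omega) (by omega); simpa using this⟩

lemma runAt_some (cs : List Char) (j : Int) (h0 : 0 ≤ j) (h1 : j < (cs.length : Int))
    (hd : PySem.Chars.isdigit (cs.getD j.toNat ' ') = true) :
    runAt (digitRuns cs) j =
      some (j + 1 - ((bwdT cs j.toNat).length : Int), j + ((fwdT cs j.toNat).length : Int)) := by
  obtain ⟨se, hmem, hin⟩ := runs_complete cs j.toNat (by omega)
    (by convert hd using 3)
  have hjcast : ((j.toNat : Nat) : Int) = j := by omega
  rw [hjcast] at hin
  have hfind : (digitRuns cs).find? (fun se => decide (se.1 ≤ j) && decide (j < se.2)) ≠ none := by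
    intro hnone
    rw [List.find?_eq_none] at hnone
    exact hnone se hmem (by simp [hin.1, hin.2])
  obtain ⟨x, hx⟩ := Option.ne_none_iff_exists'.mp hfind
  have hxmem := List.mem_of_find?_eq_some hx
  have hxp := List.find?_some hx
  simp only [Bool.and_eq_true, decide_eq_true_eq] at hxp
  have hRx := runs_sound cs x hxmem
  have huniq := run_uniq cs x.1 x.2 j.toNat hRx (by omega) (by omega)
  rw [hjcast] at huniq
  unfold runAt
  rw [hx]
  congr 1
  ext <;> simp <;> omega

-- ---- crawler results in terms of runAt ----

lemma strIsdigit_nil : PySem.Chars.strIsdigit [] = false := by decide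

lemma strIsdigit_of_all (d : List Char) (hne : d ≠ [])
    (hall : ∀ x ∈ d, PySem.Chars.isdigit x = true) : PySem.Chars.strIsdigit d = true := by
  cases d with
  | nil => cases hne rfl
  | cons a l =>
    simp only [PySem.Chars.strIsdigit]
    simp [List.all_eq_true]
    exact ⟨hall a (by simp), fun x hx => hall x (by simp [hx])⟩

lemma mem_tw {p : Char → Bool} : ∀ (l : List Char) (x : Char), x ∈ l.takeWhile p → p x = true := by
  intro l
  induction l with
  | nil => intro x hx; simp at hx
  | cons c t ih =>
    intro x hx
    by_cases hc : p c
    · rw [List.takeWhile_cons_of_pos hc] at hx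
      rcases List.mem_cons.mp hx with rfl | hx
      · exact hc
      · exact ih x hx
    · rw [List.takeWhile_cons_of_neg hc] at hx
      simp at hx

lemma rev_pre_suf (a b : List Char) (h : a <+: b.reverse) : a.reverse <:+ b := by
  obtain ⟨t, ht⟩ := h
  exact ⟨t.reverse, by rw [← List.reverse_reverse b, ← ht, List.reverse_append]⟩

lemma take_drop_comm (l : List Char) (n m : Nat) : (l.take n).drop m = (l.drop m).take (n - m) := by
  rw [List.drop_take]

lemma slice_split (cs : List Char) (a m b : Nat) (h1 : a ≤ m) (h2 : m ≤ b) :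
    PySem.List.slice cs (some (a:Int)) (some (b:Int)) =
      PySem.List.slice cs (some (a:Int)) (some (m:Int)) ++
        PySem.List.slice cs (some (m:Int)) (some (b:Int)) := by
  rw [PySem.List.slice_natCast, PySem.List.slice_natCast, PySem.List.slice_natCast]
  rw [show b - a = (m-a) + (b-m) by omega, List.take_add]
  congr 1
  rw [List.drop_drop]
  congr 2
  omega

lemma fwd_val (cs : List Char) (j : Nat) :
    PySem.List.slice cs (some (j:Int)) (some ((j:Int) + ((fwdT cs j).length : Int))) = fwdT cs j := by
  rw [PySem.List.slice_natCast_add]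
  exact (tw_eq_take (p := PySem.Chars.isdigit) (cs.drop j)).symm

lemma bwdT_le (cs : List Char) (j : Nat) (hj : j < cs.length) : (bwdT cs j).length ≤ j + 1 := by
  have h := (List.takeWhile_prefix (l := (cs.take (j+1)).reverse) PySem.Chars.isdigit).length_le
  simpa [List.length_take, Nat.min_eq_left (by omega : j+1 ≤ cs.length)] using h

lemma bwd_val (cs : List Char) (j : Nat) (hj : j < cs.length) :
    PySem.List.slice cs (some ((j + 1 - (bwdT cs j).length : Nat) : Int)) (some ((j+1 : Nat) : Int))
      = (bwdT cs j).reverse := by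
  have hBle := bwdT_le cs j hj
  rw [PySem.List.slice_natCast]
  rw [show (j+1) - (j+1 - (bwdT cs j).length) = (bwdT cs j).length by omega]
  have hsuf : (bwdT cs j).reverse <:+ cs.take (j+1) :=
    rev_pre_suf _ _ (List.takeWhile_prefix (l := (cs.take (j+1)).reverse) PySem.Chars.isdigit)
  have hd := List.suffix_iff_eq_drop.mp hsuf
  rw [List.length_reverse] at hd
  have hlen : (cs.take (j+1)).length = j + 1 := by
    simp [List.length_take]
    omega
  rw [hlen] at hd
  rw [hd, take_drop_comm]
  congr 1
  omega

lemma fwd_step (cs : List Char) (k : Nat) (hk : k < cs.length)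
    (hd : PySem.Chars.isdigit cs[k] = true) :
    fwdT cs k = cs[k] :: fwdT cs (k+1) := by
  unfold fwdT
  rw [List.drop_eq_getElem_cons hk, List.takeWhile_cons_of_pos hd]

lemma fwdT_len_one (cs : List Char) (k : Nat) (hk : k < cs.length)
    (hd : PySem.Chars.isdigit cs[k] = true)
    (hstop : cs.length ≤ k+1 ∨ PySem.Chars.isdigit (cs.getD (k+1) ' ') = false) :
    (fwdT cs k).length = 1 := by
  have hnil : fwdT cs (k+1) = [] := by
    unfold fwdT
    rcases hstop with h | h
    · rw [List.drop_eq_nil_of_le h]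
      simp
    · cases hdrop : cs.drop (k+1) with
      | nil => simp
      | cons a t =>
        obtain ⟨hlt, hget⟩ := head_drop_cons cs (k+1) a t hdrop
        rw [hget] at h
        rw [List.takeWhile_cons_of_neg (by simp [h])]
  rw [fwd_step cs k hk hd, hnil]
  rfl

lemma bwdT_len_one (cs : List Char) (k : Nat) (hk : k < cs.length)
    (hd : PySem.Chars.isdigit cs[k] = true)
    (hstop : k = 0 ∨ PySem.Chars.isdigit (cs.getD (k-1) ' ') = false) :
    (bwdT cs k).length = 1 := by
  have hnil : ((cs.take k).reverse).takeWhile PySem.Chars.isdigit = [] := by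
    rcases hstop with h | h
    · subst h
      simp
    · have hk0 : 0 < k := by
        by_contra h0
        have hz : k = 0 := by omega
        subst hz
        rw [getD_eq_getElem' cs 0 (by omega)] at h
        rw [h] at hd
        simp at hd
      obtain ⟨m, rfl⟩ : ∃ m, k = m + 1 := ⟨k - 1, by omega⟩
      rw [rev_take_succ cs m (by omega)]
      simp only [Nat.add_sub_cancel] at h
      rw [getD_eq_getElem' cs m (by omega)] at h
      rw [List.takeWhile_cons_of_neg (by simp [h])]
  unfold bwdT
  rw [rev_take_succ cs k hk, List.takeWhile_cons_of_pos hd, hnil]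
  rfl

lemma if_some_aux (P : Prop) [Decidable P] (X v : List Char)
    (h : (if P then some X else none) = some v) : P ∧ X = v := by
  split_ifs at h with hp
  · exact ⟨hp, Option.some.inj h⟩

lemma fwd_val' (cs : List Char) (j : Int) (h0 : 0 ≤ j) :
    PySem.List.slice cs (some j) (some (j + ((fwdT cs j.toNat).length : Int))) = fwdT cs j.toNat := by
  obtain ⟨n, rfl⟩ : ∃ n : Nat, j = (n : Int) := ⟨j.toNat, by omega⟩
  rw [Int.toNat_natCast]
  exact fwd_val cs n

lemma bwd_val' (cs : List Char) (j : Int) (h0 : 0 ≤ j) (h1 : j < (cs.length : Int)) :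
    PySem.List.slice cs (some (j + 1 - ((bwdT cs j.toNat).length : Int))) (some (j+1))
      = (bwdT cs j.toNat).reverse := by
  obtain ⟨n, rfl⟩ : ∃ n : Nat, j = (n : Int) := ⟨j.toNat, by omega⟩
  rw [Int.toNat_natCast]
  have hB := bwdT_le cs n (by omega)
  rw [show (n:Int) + 1 - ((bwdT cs n).length:Int) = (((n + 1 - (bwdT cs n).length : Nat)):Int) by omega,
    show (n:Int) + 1 = (((n+1 : Nat)):Int) by omega]
  exact bwd_val cs n (by omega)

lemma cond_of_runAt_some (cs : List Char) (j : Int) (se : Int × Int)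
    (h : runAt (digitRuns cs) j = some se) :
    0 ≤ j ∧ j < (cs.length : Int) ∧ PySem.Chars.isdigit (cs.getD j.toNat ' ') = true := by
  by_contra hc
  rw [runAt_none cs j hc] at h
  exact absurd h (by simp)

lemma ncond_of_runAt_none (cs : List Char) (j : Int) (h : runAt (digitRuns cs) j = none) :
    ¬ (0 ≤ j ∧ j < (cs.length : Int) ∧ PySem.Chars.isdigit (cs.getD j.toNat ' ') = true) := by
  intro hc
  rw [runAt_some cs j hc.1 hc.2.1 hc.2.2] at h
  exact absurd h (by simp)

lemma seq_of_runAt_some (cs : List Char) (j : Int) (se : Int × Int)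
    (h : runAt (digitRuns cs) j = some se) :
    se = (j + 1 - ((bwdT cs j.toNat).length : Int), j + ((fwdT cs j.toNat).length : Int)) := by
  obtain ⟨h0, h1, hd⟩ := cond_of_runAt_some cs j se h
  have hse := runAt_some cs j h0 h1 hd
  exact Option.some.inj (h.symm.trans hse)

lemma crawl_cond_none (cs : List Char) (fwd : Bool) (i : Int)
    (h : ¬ (0 ≤ i ∧ i < (cs.length : Int) ∧ PySem.Chars.isdigit (cs.getD i.toNat ' ') = true)) :
    crawlLoop cs fwd (cs.length + 1) i = [] := by
  by_cases hin : 0 ≤ i ∧ i < (cs.length : Int)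
  · have hjlt : i.toNat < cs.length := by omega
    have hd : ¬ PySem.Chars.isdigit cs[i.toNat] := by
      intro hd
      exact h ⟨hin.1, hin.2, by rw [getD_eq_getElem' _ _ hjlt]; exact hd⟩
    rw [show i = ((i.toNat : Nat) : Int) by omega, crawl_succ_in cs fwd cs.length i.toNat hjlt,
      if_neg hd]
  · exact crawl_oob cs fwd _ i hin

lemma crawl_bwd' (cs : List Char) (j : Int) (h0 : 0 ≤ j) (h1 : j < (cs.length : Int)) :
    crawlLoop cs false (cs.length + 1) j = bwdT cs j.toNat := by
  rw [show j = ((j.toNat : Nat) : Int) by omega]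
  exact crawl_bwd cs j.toNat (cs.length + 1) (by omega) (by omega)

lemma crawl_fwd' (cs : List Char) (j : Int) (h0 : 0 ≤ j) :
    crawlLoop cs true (cs.length + 1) j = fwdT cs j.toNat := by
  rw [show j = ((j.toNat : Nat) : Int) by omega]
  exact crawl_fwd cs (cs.length + 1) j.toNat (by omega)

lemma fwdT_ne (cs : List Char) (j : Nat) (hj : j < cs.length)
    (hd : PySem.Chars.isdigit (cs.getD j ' ') = true) : fwdT cs j ≠ [] := by
  rw [getD_eq_getElem' _ _ hj] at hd
  rw [fwd_step cs j hj hd]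
  simp

lemma bwdT_ne (cs : List Char) (j : Nat) (hj : j < cs.length)
    (hd : PySem.Chars.isdigit (cs.getD j ' ') = true) : bwdT cs j ≠ [] := by
  rw [getD_eq_getElem' _ _ hj] at hd
  unfold bwdT
  rw [rev_take_succ cs j hj, List.takeWhile_cons_of_pos hd]
  simp

lemma digitCrawler_some_ne (cs : List Char) (s : Int) (d : PyDirection) (v : List Char)
    (h : digitCrawler cs s d = some v) : v ≠ [] := by
  cases d <;>
    (simp only [digitCrawler] at h
     obtain ⟨hp, hx⟩ := if_some_aux _ _ _ h
     intro hnil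
     rw [hnil] at hx
     rw [hx] at hp
     exact absurd hp (by decide))

lemma L_bwd_none (cs : List Char) (j : Int) (h : runAt (digitRuns cs) j = none) :
    digitCrawler cs j .backward = none := by
  have hcond := ncond_of_runAt_none cs j h
  simp only [digitCrawler]
  rw [crawl_cond_none cs false j hcond]
  simp [strIsdigit_nil]

lemma L_bwd_some (cs : List Char) (j : Int) (se : Int × Int)
    (h : runAt (digitRuns cs) j = some se) :
    digitCrawler cs j .backward = some (PySem.List.slice cs (some se.1) (some (j+1))) := by
  obtain ⟨h0, h1, hd⟩ := cond_of_runAt_some cs j se h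
  have hseq := seq_of_runAt_some cs j se h
  have hjlt : j.toNat < cs.length := by omega
  simp only [digitCrawler]
  rw [crawl_bwd' cs j h0 h1]
  have hne := bwdT_ne cs j.toNat hjlt (by convert hd using 3)
  rw [if_pos hne]
  have hdig : PySem.Chars.strIsdigit (bwdT cs j.toNat).reverse = true :=
    strIsdigit_of_all _ (by simp [hne]) (fun x hx => mem_tw _ x (List.mem_reverse.mp hx))
  rw [if_pos hdig]
  congr 1
  have hs : se.1 = j + 1 - ((bwdT cs j.toNat).length : Int) := by rw [hseq]
  rw [hs, bwd_val' cs j h0 h1]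

lemma L_fwd_none (cs : List Char) (j : Int) (h : runAt (digitRuns cs) j = none) :
    digitCrawler cs j .forward = none := by
  have hcond := ncond_of_runAt_none cs j h
  simp only [digitCrawler]
  rw [crawl_cond_none cs true j hcond]
  simp [strIsdigit_nil]

lemma L_fwd_some (cs : List Char) (j : Int) (se : Int × Int)
    (h : runAt (digitRuns cs) j = some se) :
    digitCrawler cs j .forward = some (PySem.List.slice cs (some j) (some se.2)) := by
  obtain ⟨h0, h1, hd⟩ := cond_of_runAt_some cs j se h
  have hseq := seq_of_runAt_some cs j se h
  have hjlt : j.toNat < cs.length := by omega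
  simp only [digitCrawler]
  rw [crawl_fwd' cs j h0]
  have hne := fwdT_ne cs j.toNat hjlt (by convert hd using 3)
  have hdig : PySem.Chars.strIsdigit (fwdT cs j.toNat) = true :=
    strIsdigit_of_all _ hne (fun x hx => mem_tw _ x hx)
  rw [if_pos hdig]
  congr 1
  have he : se.2 = j + ((fwdT cs j.toNat).length : Int) := by rw [hseq]
  rw [he, fwd_val' cs j h0]

lemma L_bid_none (cs : List Char) (c : Int) (h : runAt (digitRuns cs) c = none) :
    digitCrawler cs c .bidirectional = none := by
  have hcond := ncond_of_runAt_none cs c h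
  simp only [digitCrawler]
  rw [crawl_cond_none cs false c hcond]
  simp [strIsdigit_nil]

lemma L_bid_some (cs : List Char) (c : Int) (se : Int × Int)
    (h : runAt (digitRuns cs) c = some se) :
    digitCrawler cs c .bidirectional = some (PySem.List.slice cs (some se.1) (some se.2)) := by
  obtain ⟨h0, h1, hd⟩ := cond_of_runAt_some cs c se h
  have hseq := seq_of_runAt_some cs c se h
  obtain ⟨n, rfl⟩ : ∃ n : Nat, c = (n : Int) := ⟨c.toNat, by omega⟩
  rw [Int.toNat_natCast] at hseq hd
  have hnlt : n < cs.length := by omega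
  have hdE : PySem.Chars.isdigit cs[n] = true := by
    rw [← getD_eq_getElem' _ _ hnlt]; exact hd
  have hne := bwdT_ne cs n hnlt hd
  simp only [digitCrawler]
  rw [crawl_bwd' cs (n : Int) h0 h1, Int.toNat_natCast, if_pos hne]
  have hcnat : ((n : Int) + 1).toNat = n + 1 := by omega
  have hfold : (if PySem.Chars.strIsdigit (crawlLoop cs true (cs.length + 1) ((n : Int)+1)) = true then
      some (crawlLoop cs true (cs.length + 1) ((n : Int)+1)) else none)
      = digitCrawler cs ((n : Int)+1) .forward := by
    simp only [digitCrawler]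
  rw [hfold]
  cases hnext : runAt (digitRuns cs) ((n : Int)+1) with
  | none =>
    rw [L_fwd_none cs ((n : Int)+1) hnext]
    have hF1 : (fwdT cs n).length = 1 := by
      apply fwdT_len_one cs n hnlt hdE
      have hnc := ncond_of_runAt_none cs ((n : Int)+1) hnext
      by_cases hlen : (cs.length : Int) ≤ (n : Int) + 1
      · left; omega
      · right
        have hnd : ¬ PySem.Chars.isdigit (cs.getD ((n : Int)+1).toNat ' ') = true :=
          fun hdd => hnc ⟨by omega, by omega, hdd⟩
        rw [hcnat] at hnd
        simpa using hnd
    have hdigall : PySem.Chars.strIsdigit (bwdT cs n).reverse = true :=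
      strIsdigit_of_all _ (by simp [hne]) (fun x hx => mem_tw _ x (List.mem_reverse.mp hx))
    dsimp only
    rw [if_pos hdigall]
    congr 1
    have hse1 : se.1 = (n : Int) + 1 - ((bwdT cs n).length : Int) := by rw [hseq]
    have hse2 : se.2 = (n : Int) + 1 := by rw [hseq]; simp [hF1]
    have hbv := bwd_val' cs (n : Int) h0 h1
    rw [Int.toNat_natCast] at hbv
    rw [hse1, hse2]
    exact hbv.symm
  | some se2 =>
    rw [L_fwd_some cs ((n : Int)+1) se2 hnext]
    obtain ⟨h0', h1', hd'⟩ := cond_of_runAt_some cs ((n : Int)+1) se2 hnext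
    have hseq2 := seq_of_runAt_some cs ((n : Int)+1) se2 hnext
    rw [hcnat] at hseq2 hd'
    have hn1lt : n + 1 < cs.length := by omega
    have hval2 : PySem.List.slice cs (some ((n : Int)+1)) (some se2.2) = fwdT cs (n+1) := by
      have he2 : se2.2 = ((n : Int)+1) + ((fwdT cs (n+1)).length : Int) := by rw [hseq2]
      rw [he2]
      have := fwd_val' cs ((n : Int)+1) h0'
      rw [hcnat] at this
      exact this
    have hnef : fwdT cs (n+1) ≠ [] := fwdT_ne cs (n+1) hn1lt hd'
    have hdigall : PySem.Chars.strIsdigit ((bwdT cs n).reverse ++ fwdT cs (n+1)) = true := by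
      apply strIsdigit_of_all _ (by simp [hne])
      intro x hx
      rcases List.mem_append.mp hx with hx | hx
      · exact mem_tw _ x (List.mem_reverse.mp hx)
      · exact mem_tw _ x hx
    have hfinal : PySem.List.slice cs (some se.1) (some se.2)
        = (bwdT cs n).reverse ++ fwdT cs (n+1) := by
      have hB := bwdT_le cs n hnlt
      have hFstep : fwdT cs n = cs[n] :: fwdT cs (n+1) := fwd_step cs n hnlt hdE
      have hse1 : se.1 = (((n + 1 - (bwdT cs n).length : Nat)) : Int) := by
        rw [hseq]; push_cast; omega
      have hse2 : se.2 = (((n + 1 + (fwdT cs (n+1)).length : Nat)) : Int) := by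
        rw [hseq, hFstep]
        simp only [List.length_cons]
        push_cast
        ring
      rw [hse1, hse2, slice_split cs (n + 1 - (bwdT cs n).length) (n+1) (n + 1 + (fwdT cs (n+1)).length) (by omega) (by omega)]
      congr 1
      · exact bwd_val cs n hnlt
      · rw [show (((n + 1 + (fwdT cs (n+1)).length : Nat)) : Int) = (((n+1 : Nat)) : Int) + ((fwdT cs (n+1)).length : Int) by push_cast; ring]
        exact fwd_val cs (n+1)
    simp [hval2, hnef, hdigall, hfinal]

lemma L_endc (cs : List Char) (c : Int) (se : Int × Int)
    (hc : runAt (digitRuns cs) c = none) (h : runAt (digitRuns cs) (c-1) = some se) :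
    se.2 = c := by
  obtain ⟨h0, h1, hd⟩ := cond_of_runAt_some cs (c-1) se h
  have hseq := seq_of_runAt_some cs (c-1) se h
  have hk : (c-1).toNat < cs.length := by omega
  have hdE : PySem.Chars.isdigit cs[(c-1).toNat] = true := by
    rw [← getD_eq_getElem' _ _ hk]; exact hd
  have hF1 : (fwdT cs (c-1).toNat).length = 1 := by
    apply fwdT_len_one cs _ hk hdE
    have hnc := ncond_of_runAt_none cs c hc
    by_cases hlen : (cs.length : Int) ≤ c
    · left; omega
    · right
      have hnd : ¬ PySem.Chars.isdigit (cs.getD c.toNat ' ') = true :=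
        fun hdd => hnc ⟨by omega, by omega, hdd⟩
      have hcnat : (c-1).toNat + 1 = c.toNat := by omega
      rw [hcnat]
      simpa using hnd
  rw [hseq]
  simp only
  rw [hF1]
  push_cast
  ring

lemma L_startc (cs : List Char) (c : Int) (se : Int × Int)
    (hc : runAt (digitRuns cs) c = none) (h : runAt (digitRuns cs) (c+1) = some se) :
    se.1 = c + 1 := by
  obtain ⟨h0, h1, hd⟩ := cond_of_runAt_some cs (c+1) se h
  have hseq := seq_of_runAt_some cs (c+1) se h
  have hk : (c+1).toNat < cs.length := by omega
  have hdE : PySem.Chars.isdigit cs[(c+1).toNat] = true := by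
    rw [← getD_eq_getElem' _ _ hk]; exact hd
  have hB1 : (bwdT cs (c+1).toNat).length = 1 := by
    apply bwdT_len_one cs _ hk hdE
    by_cases hc0 : c < 0
    · left; omega
    · right
      have hnc := ncond_of_runAt_none cs c hc
      have hnd : ¬ PySem.Chars.isdigit (cs.getD c.toNat ' ') = true :=
        fun hdd => hnc ⟨by omega, by omega, hdd⟩
      have hcnat : (c+1).toNat - 1 = c.toNat := by omega
      rw [hcnat]
      simpa using hnd
  rw [hseq]
  simp only
  rw [hB1]
  push_cast
  ring

-- ---- the three row-segment equalities ----

lemma seg_bwd (cs : List Char) (c : Int) (nums : List Int) :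
    pyTruthyAppend nums (digitCrawler cs (c-1) .backward)
    = match runAt (digitRuns cs) (c-1) with
      | some se => nums ++ [pyInt (PySem.List.slice cs (some se.1) (some c))]
      | none => nums := by
  cases h : runAt (digitRuns cs) (c-1) with
  | none => simp [pyTruthyAppend, L_bwd_none cs _ h, pyTruthy]
  | some se =>
    have hv := L_bwd_some cs (c-1) se h
    have hc : c - 1 + 1 = c := by ring
    rw [hc] at hv
    have hne := digitCrawler_some_ne cs (c-1) .backward _ hv
    simp [pyTruthyAppend, hv, pyTruthy, hne]

lemma seg_fwd (cs : List Char) (c : Int) (nums : List Int) :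
    pyTruthyAppend nums (digitCrawler cs (c+1) .forward)
    = match runAt (digitRuns cs) (c+1) with
      | some se => nums ++ [pyInt (PySem.List.slice cs (some (c+1)) (some se.2))]
      | none => nums := by
  cases h : runAt (digitRuns cs) (c+1) with
  | none => simp [pyTruthyAppend, L_fwd_none cs _ h, pyTruthy]
  | some se =>
    have hv := L_fwd_some cs (c+1) se h
    have hne := digitCrawler_some_ne cs (c+1) .forward _ hv
    simp [pyTruthyAppend, hv, pyTruthy, hne]

lemma seg_row (cs : List Char) (c : Int) (nums : List Int) :
    (if pyTruthy (digitCrawler cs c .bidirectional) then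
       nums ++ [pyInt ((digitCrawler cs c .bidirectional).getD [])]
     else
       match runAt (digitRuns cs) (c+1) with
       | some se2 =>
           (match runAt (digitRuns cs) (c-1) with
            | some se => nums ++ [pyInt (PySem.List.slice cs (some se.1) (some c))]
            | none => nums) ++ [pyInt (PySem.List.slice cs (some (c+1)) (some se2.2))]
       | none =>
           match runAt (digitRuns cs) (c-1) with
           | some se => nums ++ [pyInt (PySem.List.slice cs (some se.1) (some c))]
           | none => nums)
    = nums ++ adjacentIn cs c := by
  cases h : runAt (digitRuns cs) c with
  | some se =>
    have hv := L_bid_some cs c se h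
    have hne := digitCrawler_some_ne cs c .bidirectional _ hv
    simp [hv, pyTruthy, hne, adjacentIn, h]
  | none =>
    have hv := L_bid_none cs c h
    rw [hv]
    simp only [pyTruthy, Bool.false_eq_true, if_false]
    unfold adjacentIn
    cases hl : runAt (digitRuns cs) (c-1) with
    | none =>
      cases hr : runAt (digitRuns cs) (c+1) with
      | none => simp [h, hl, hr]
      | some se' =>
        have hs := L_startc cs c se' h hr
        simp [h, hl, hr, hs]
    | some se' =>
      have he := L_endc cs c se' h hl
      cases hr : runAt (digitRuns cs) (c+1) with
      | none => simp [h, hl, hr, he]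
      | some se'' =>
        have hs := L_startc cs c se'' h hr
        simp [h, hl, hr, he, hs]

-- ===== VERDICT (by name: the statement is the Claim_ definition above) =====
theorem sum_of_surrounding_numbers_spec : Claim_equal_sum_of_surrounding_numbers := by
  intro schematic symbol req _ _
  unfold Spec_sum_of_surrounding_numbers sum_of_surrounding_numbers sum_of_surrounding_numbers_alt
  simp only [seg_bwd, seg_fwd, seg_row]
  split_ifs with h1 h2 <;>
    first
      | rfl
      | (exact absurd h1 h2)
      | (push_neg at h2; exact absurd h2 h1)
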